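-- pv_equiv track=rewrite | github.com/beofalejandro/Calculadora-de-Encriptacion | app.py | vernam_encrypt
-- ===== SOURCE A (Python) =====
-- baudot_code = {
--     'A': '00011', 'B': '11001', 'C': '01110', 'D': '01001', 'E': '00001',
--     'F': '01101', 'G': '11010', 'H': '10100', 'I': '00110', 'J': '01011',
--     'K': '01111', 'L': '10010', 'M': '11100', 'N': '01100', 'O': '11000',
--     'P': '10110', 'Q': '10111', 'R': '01010', 'S': '00101', 'T': '10000',
--     'U': '00111', 'V': '11110', 'W': '10011', 'X': '11101', 'Y': '10101',
--     'Z': '10001', ' ': '00000'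
-- }
--
-- def text_to_baudot(text):
--     """Convierte texto a su representación en código Baudot binario."""
--     return ''.join(baudot_code.get(char.upper(), '00000') for char in text)
--
-- def vernam_encrypt(plain_text, key):
--     # Convertir texto y clave a código Baudot
--     binary_plain = text_to_baudot(plain_text)
--     binary_key = text_to_baudot(key)
--
--     # Asegurar que la clave es al menos tan larga como el texto
--     if len(binary_key) < len(binary_plain):
--         raise ValueError("La clave debe ser al menos tan larga como el texto.")
--
--     # Aplicar XOR para cifrar
--     cipher_binary = ''.join(str(int(a) ^ int(b))
--                             for a, b in zip(binary_plain, binary_key))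
--     return cipher_binary
-- ===== SOURCE B (Python) =====
-- _BAUDOT_VAL = {
--     'A': 0b00011, 'B': 0b11001, 'C': 0b01110, 'D': 0b01001, 'E': 0b00001,
--     'F': 0b01101, 'G': 0b11010, 'H': 0b10100, 'I': 0b00110, 'J': 0b01011,
--     'K': 0b01111, 'L': 0b10010, 'M': 0b11100, 'N': 0b01100, 'O': 0b11000,
--     'P': 0b10110, 'Q': 0b10111, 'R': 0b01010, 'S': 0b00101, 'T': 0b10000,
--     'U': 0b00111, 'V': 0b11110, 'W': 0b10011, 'X': 0b11101, 'Y': 0b10101,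
--     'Z': 0b10001, ' ': 0b00000
-- }
--
-- def vernam_encrypt(plain_text, key):
--     # key must cover the plain text (same condition as the 5x binary-length check)
--     if len(key) < len(plain_text):
--         raise ValueError("La clave debe ser al menos tan larga como el texto.")
--     out = []
--     for p, k in zip(plain_text, key):
--         x = _BAUDOT_VAL.get(p.upper(), 0) ^ _BAUDOT_VAL.get(k.upper(), 0)
--         out.append(''.join('1' if x & m else '0' for m in (16, 8, 4, 2, 1)))
--     return ''.join(out)
-- ===== Notes on version B (the rewrite author's own statement) =====
-- stated objective: simpler
-- what changed: B replaces A's build-two-concatenated-bit-strings-then-XOR-character-by-character pipeline by a single per-character pass: a table of 5-bit integer Baudot values, one integer XOR per (plain, key) character pair, emitting its 5 binary digits directly (constant-factor win: no intermediate bit strings, one int XOR instead of five str->int conversions per character).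
import Mathlib
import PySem

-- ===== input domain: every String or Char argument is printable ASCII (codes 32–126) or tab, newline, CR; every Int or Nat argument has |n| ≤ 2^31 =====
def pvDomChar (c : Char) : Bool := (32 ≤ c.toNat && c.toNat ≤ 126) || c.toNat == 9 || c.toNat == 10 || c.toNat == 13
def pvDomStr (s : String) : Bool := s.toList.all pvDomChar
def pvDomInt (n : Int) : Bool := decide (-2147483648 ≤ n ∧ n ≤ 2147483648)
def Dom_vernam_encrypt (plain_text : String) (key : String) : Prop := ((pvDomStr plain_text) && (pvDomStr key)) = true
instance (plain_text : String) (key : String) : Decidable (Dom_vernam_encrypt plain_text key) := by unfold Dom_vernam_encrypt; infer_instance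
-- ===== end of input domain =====

-- B replaces A's bit-string concatenation + per-bit XOR by a per-character pass: a table of 5-bit
-- integer Baudot values, one XOR per (plain, key) character pair, emitting its 5 binary digits
-- (objective: simpler one-pass decomposition; same linear cost).

-- ===== PORT A =====
def pvTable : List (String × String) :=
  [("A","00011"),("B","11001"),("C","01110"),("D","01001"),("E","00001"),
   ("F","01101"),("G","11010"),("H","10100"),("I","00110"),("J","01011"),
   ("K","01111"),("L","10010"),("M","11100"),("N","01100"),("O","11000"),
   ("P","10110"),("Q","10111"),("R","01010"),("S","00101"),("T","10000"),
   ("U","00111"),("V","11110"),("W","10011"),("X","11101"),("Y","10101"),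
   ("Z","10001"),(" ","00000")]

def pvBaudotA : PySem.Dict String String := PySem.Dict.ofList pvTable

def text_to_baudot (text : String) : String :=
  PySem.Str.join "" (text.toList.map (fun ch =>
    PySem.Dict.getD pvBaudotA (PySem.Str.upper (String.ofList [ch])) "00000"))

def vernam_encrypt (plain_text : String) (key : String) : String :=
  let binary_plain := text_to_baudot plain_text
  let binary_key := text_to_baudot key
  -- Python raises ValueError on this branch; those inputs are outside Pre_
  if PySem.Str.len binary_key < PySem.Str.len binary_plain then ""
  else
    PySem.Str.join "" ((binary_plain.toList.zip binary_key.toList).map (fun ab =>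
      PySem.Int.toStr (PySem.Int.bxor ((PySem.Int.ofChars? [ab.1]).getD 0)
                                      ((PySem.Int.ofChars? [ab.2]).getD 0))))

-- ===== PORT B =====
def pvBaudotVal : PySem.Dict String Int := PySem.Dict.ofList
  [("A",3),("B",25),("C",14),("D",9),("E",1),
   ("F",13),("G",26),("H",20),("I",6),("J",11),
   ("K",15),("L",18),("M",28),("N",12),("O",24),
   ("P",22),("Q",23),("R",10),("S",5),("T",16),
   ("U",7),("V",30),("W",19),("X",29),("Y",21),
   ("Z",17),(" ",0)]

-- ''.join('1' if x & m else '0' for m in (16, 8, 4, 2, 1))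
def pvBits5 (x : Int) : String :=
  String.ofList ([(16:Int),8,4,2,1].map (fun m => if PySem.Int.band x m ≠ 0 then '1' else '0'))

def vernam_encrypt_alt (plain_text : String) (key : String) : String :=
  -- B raises ValueError on this branch (the same inputs as A); outside Pre_
  if PySem.Str.len key < PySem.Str.len plain_text then ""
  else
    PySem.Str.join "" ((plain_text.toList.zip key.toList).map (fun pk =>
      pvBits5 (PySem.Int.bxor
        (PySem.Dict.getD pvBaudotVal (PySem.Str.upper (String.ofList [pk.1])) 0)
        (PySem.Dict.getD pvBaudotVal (PySem.Str.upper (String.ofList [pk.2])) 0))))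

-- ===== PRECONDITION & SPEC =====
-- Pre_ excludes exactly the inputs where Python A raises ValueError (key shorter in characters
-- than the text; A's binary-length check is 5x the character counts, so it is the same condition).
def Pre_vernam_encrypt (plain_text : String) (key : String) : Prop :=
  plain_text.toList.length ≤ key.toList.length
instance (plain_text : String) (key : String) : Decidable (Pre_vernam_encrypt plain_text key) := by
  unfold Pre_vernam_encrypt; infer_instance

def pvWitness_vernam_encrypt : String × String := ("AB", "XYZ")

def Spec_vernam_encrypt (plain_text : String) (key : String) (out : String) : Prop := out = vernam_encrypt_alt plain_text key
instance (plain_text : String) (key : String) (out : String) : Decidable (Spec_vernam_encrypt plain_text key out) := by unfold Spec_vernam_encrypt; infer_instance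

-- ===== CLAIM (what is proved, stated in full; the proofs are below) =====
def Claim_equal_vernam_encrypt : Prop := ∀ (plain_text : String) (key : String), Dom_vernam_encrypt plain_text key → Pre_vernam_encrypt plain_text key → Spec_vernam_encrypt plain_text key (vernam_encrypt plain_text key)

-- ===== LEMMAS AND PROOFS =====

-- the 28 (code-string, code-value) pairs both lookups can produce (27 table entries + default)
def pvPairs : List (String × Int) :=
  [("00011",3),("11001",25),("01110",14),("01001",9),("00001",1),
   ("01101",13),("11010",26),("10100",20),("00110",6),("01011",11),
   ("01111",15),("10010",18),("11100",28),("01100",12),("11000",24),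
   ("10110",22),("10111",23),("01010",10),("00101",5),("10000",16),
   ("00111",7),("11110",30),("10011",19),("11101",29),("10101",21),
   ("10001",17),("00000",0)]

-- the binary value of a code string (relates B's table to A's)
def pvB2I (s : String) : Int := s.toList.foldl (fun a c => 2*a + (if c = '1' then 1 else 0)) 0

-- looking up the same key in an assoc list and in its value-mapped copy yields (v, f v)
lemma pvLookup (l : List (String × String)) (f : String → Int) (u : String) (d : String) :
    ∃ v, (v = d ∨ v ∈ l.map Prod.snd) ∧
      ((PySem.Dict.mk l).get? u).getD d = v ∧
      ((PySem.Dict.mk (l.map (fun kv => (kv.1, f kv.2)))).get? u).getD (f d) = f v := by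
  induction l with
  | nil => exact ⟨d, Or.inl rfl, by simp [PySem.Dict.get?], by simp [PySem.Dict.get?]⟩
  | cons kv rest ih =>
    obtain ⟨k, w⟩ := kv
    by_cases h : (k == u) = true
    · exact ⟨w, Or.inr (by simp), by simp [PySem.Dict.get?_mk_cons, h],
        by simp [PySem.Dict.get?_mk_cons, h]⟩
    · obtain ⟨v, hv, h1, h2⟩ := ih
      refine ⟨v, ?_, ?_, ?_⟩
      · rcases hv with hv | hv
        · exact Or.inl hv
        · exact Or.inr (by simp; right; simpa using hv)
      · rw [PySem.Dict.get?_mk_cons]; simp only [h]; exact h1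
      · simp only [List.map_cons, PySem.Dict.get?_mk_cons, h]
        exact h2

-- A's lookup and B's lookup on the same key always land on a matching pair of pvPairs
lemma pvPair_mem (u : String) :
    (PySem.Dict.getD pvBaudotA u "00000", PySem.Dict.getD pvBaudotVal u 0) ∈ pvPairs := by
  have hA : pvBaudotA = PySem.Dict.mk pvTable := by decide
  have hV : pvBaudotVal = PySem.Dict.mk (pvTable.map (fun kv => (kv.1, pvB2I kv.2))) := by decide
  obtain ⟨v, hv, h1, h2⟩ := pvLookup pvTable pvB2I u "00000"
  have hmem : ∀ w ∈ ("00000" :: pvTable.map Prod.snd), (w, pvB2I w) ∈ pvPairs := by decide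
  have hvm : v ∈ "00000" :: pvTable.map Prod.snd := by
    rcases hv with hv | hv
    · simp [hv]
    · exact List.mem_cons_of_mem _ hv
  have h0 : pvB2I "00000" = 0 := by decide
  rw [h0] at h2
  simp only [PySem.Dict.getD, hA, hV]
  rw [h1, h2]
  exact hmem v hvm

-- A's per-character code as a char list, and B's per-character value
def pvGA (c : Char) : List Char :=
  (PySem.Dict.getD pvBaudotA (PySem.Str.upper (String.ofList [c])) "00000").toList
def pvVB (c : Char) : Int :=
  PySem.Dict.getD pvBaudotVal (PySem.Str.upper (String.ofList [c])) 0

-- A's per-bit output char list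
def pvFA (ab : Char × Char) : List Char :=
  (PySem.Int.toStr (PySem.Int.bxor ((PySem.Int.ofChars? [ab.1]).getD 0)
                                   ((PySem.Int.ofChars? [ab.2]).getD 0))).toList

set_option maxHeartbeats 1000000 in
lemma pvPairs_len : ∀ p ∈ pvPairs, p.1.toList.length = 5 := by decide

set_option maxHeartbeats 4000000 in
lemma pvChunk : ∀ p ∈ pvPairs, ∀ q ∈ pvPairs,
    ((p.1.toList.zip q.1.toList).map pvFA).flatten
      = (pvBits5 (PySem.Int.bxor p.2 q.2)).toList := by decide

lemma pvGA_len (c : Char) : (pvGA c).length = 5 := by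
  have h := pvPair_mem (PySem.Str.upper (String.ofList [c]))
  unfold pvGA
  revert h
  generalize PySem.Dict.getD pvBaudotA (PySem.Str.upper (String.ofList [c])) "00000" = a
  generalize PySem.Dict.getD pvBaudotVal (PySem.Str.upper (String.ofList [c])) 0 = b
  intro h
  exact pvPairs_len _ h

lemma pvChunk_c (c k : Char) :
    (((pvGA c).zip (pvGA k)).map pvFA).flatten
      = (pvBits5 (PySem.Int.bxor (pvVB c) (pvVB k))).toList := by
  have h1 := pvPair_mem (PySem.Str.upper (String.ofList [c]))
  have h2 := pvPair_mem (PySem.Str.upper (String.ofList [k]))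
  unfold pvGA pvVB
  revert h1 h2
  generalize PySem.Dict.getD pvBaudotA (PySem.Str.upper (String.ofList [c])) "00000" = a
  generalize PySem.Dict.getD pvBaudotVal (PySem.Str.upper (String.ofList [c])) 0 = va
  generalize PySem.Dict.getD pvBaudotA (PySem.Str.upper (String.ofList [k])) "00000" = b
  generalize PySem.Dict.getD pvBaudotVal (PySem.Str.upper (String.ofList [k])) 0 = vb
  intro h1 h2
  exact pvChunk _ h1 _ h2

lemma pvFlatten_len (l : List Char) : ((l.map pvGA).flatten).length = 5 * l.length := by
  induction l with
  | nil => simp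
  | cons c cs ih => simp [ih, pvGA_len, Nat.mul_succ, Nat.add_comm]

lemma pvJoinNil (parts : List (List Char)) : PySem.Chars.join [] parts = parts.flatten := by
  induction parts with
  | nil => exact PySem.Chars.join_nil []
  | cons a r ih =>
    cases r with
    | nil => simp [PySem.Chars.join_singleton]
    | cons b t => rw [PySem.Chars.join_cons_cons]; simp [ih]

-- main loop correspondence, on char lists
lemma pvMain : ∀ l1 l2 : List Char, l1.length ≤ l2.length →
    ((((l1.map pvGA).flatten).zip ((l2.map pvGA).flatten)).map pvFA).flatten
      = ((l1.zip l2).map (fun pk =>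
            (pvBits5 (PySem.Int.bxor (pvVB pk.1) (pvVB pk.2))).toList)).flatten := by
  intro l1
  induction l1 with
  | nil => intro l2 _; simp
  | cons c cs ih =>
    intro l2 h
    cases l2 with
    | nil => simp at h
    | cons k ks =>
      simp only [List.map_cons, List.flatten_cons]
      rw [List.zip_append (by rw [pvGA_len, pvGA_len])]
      simp only [List.map_append, List.flatten_append, List.zip_cons_cons,
        List.map_cons, List.flatten_cons]
      rw [pvChunk_c, ih ks (by simpa using h)]

-- char list of A's helper output
lemma pvT2B_toList (s : String) : (text_to_baudot s).toList = (s.toList.map pvGA).flatten := by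
  unfold text_to_baudot
  rw [PySem.Str.toList_join, List.map_map,
      show "".toList = ([] : List Char) from rfl, pvJoinNil]
  rfl

-- ===== VERDICT (by name: the statement is the Claim_ definition above) =====
theorem vernam_encrypt_spec : Claim_equal_vernam_encrypt := by
  intro plain_text key _ hpre
  have hle : plain_text.toList.length ≤ key.toList.length := hpre
  unfold Spec_vernam_encrypt vernam_encrypt vernam_encrypt_alt
  simp only []
  have hA : ¬ (PySem.Str.len (text_to_baudot key) < PySem.Str.len (text_to_baudot plain_text)) := by
    rw [PySem.Str.len_eq, PySem.Str.len_eq, pvT2B_toList, pvT2B_toList,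
        pvFlatten_len, pvFlatten_len]
    push_cast
    omega
  have hB : ¬ (PySem.Str.len key < PySem.Str.len plain_text) := by
    rw [PySem.Str.len_eq, PySem.Str.len_eq]
    omega
  rw [if_neg hA, if_neg hB]
  apply String.toList_inj.mp
  rw [PySem.Str.toList_join, PySem.Str.toList_join, List.map_map, List.map_map,
      show "".toList = ([] : List Char) from rfl, pvJoinNil, pvJoinNil,
      pvT2B_toList, pvT2B_toList]
  exact pvMain plain_text.toList key.toList hle
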